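-- pv_equiv track=rewrite | github.com/VaHiX/CodeForces | Python/ByRound/1887/1887_A2_Dances_Hard_Version.py | solve
-- ===== SOURCE A (Python) =====
-- def solve(nums1, nums2):
--     nums1.sort()  # Sort first array
--     nums2.sort()  # Sort second array
--     n1 = len(nums1)
--     n2 = len(nums2)
--     dp1 = [0 for i in range(n2)]  # dp1[i] = 1 if we can match nums1[pos1] with nums2[i]
--     pos1 = 0  # Pointer for nums1
--     for i in range(n2):
--         if pos1 < n1 and nums2[i] > nums1[pos1]:
--             dp1[i] = 1
--             pos1 += 1  # Move to next element in nums1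
--     remain = n2 - pos1  # Number of unmatched elements in nums2
--     lastMax = nums2[n2 - 1]  # Get max element in nums2 to help determine switch point for m
--     for i in range(n2 - 1, -1, -1):
--         if dp1[i] == 0:
--             lastMax = nums2[i]
--             break
--     return remain, lastMax
-- ===== SOURCE B (Python) =====
-- def solve(nums1, nums2):
--     nums1.sort()
--     nums2.sort()
--     n2 = len(nums2)
--     lastMax = nums2[n2 - 1]  # IndexError on empty nums2, like the original
--     i = 0
--     matched = 0
--     for x in nums1:
--         while i < n2 and nums2[i] <= x:
--             lastMax = nums2[i]
--             i += 1
--         if i < n2: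
--             matched += 1
--             i += 1
--     if i < n2:
--         lastMax = nums2[n2 - 1]
--     return n2 - matched, lastMax
-- ===== Notes on version B (the rewrite author's own statement) =====
-- stated objective: alternative
-- what changed: Inverts the traversal: instead of one pass over nums2 filling a dp1 marker array plus a separate backward break-scan, B loops over nums1 with an inner while that skips (and records) the nums2 elements it cannot beat, counting matches and tracking the last skipped element directly, with a final tail rule for leftover nums2 elements; no auxiliary array and no backward scan.
import Mathlib
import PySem

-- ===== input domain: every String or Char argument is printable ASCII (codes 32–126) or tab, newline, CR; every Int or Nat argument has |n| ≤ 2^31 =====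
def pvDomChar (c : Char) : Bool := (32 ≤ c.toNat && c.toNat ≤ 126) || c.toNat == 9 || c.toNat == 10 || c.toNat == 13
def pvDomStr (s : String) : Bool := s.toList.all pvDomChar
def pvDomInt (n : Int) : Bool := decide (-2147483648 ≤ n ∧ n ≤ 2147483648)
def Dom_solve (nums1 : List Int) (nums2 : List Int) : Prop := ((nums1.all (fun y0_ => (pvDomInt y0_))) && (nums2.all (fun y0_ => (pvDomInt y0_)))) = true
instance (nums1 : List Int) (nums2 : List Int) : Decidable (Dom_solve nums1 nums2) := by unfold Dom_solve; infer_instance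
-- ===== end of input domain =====

-- B inverts the traversal: an outer loop over nums1 with an inner skip-loop over nums2 replaces
-- A's dp1 marker array + backward break-scan. Both Pythons sort their arguments in place;
-- the equivalence proved here is about the RETURN value.

-- ===== PORT A =====
-- one step of A's forward matching loop: state (dp1, pos1)
def stepA (a b : List Int) (st : List Int × Int) (i : Int) : List Int × Int :=
  if st.2 < (a.length : Int) ∧ PySem.List.pyGetD b i 0 > PySem.List.pyGetD a st.2 0 then
    (PySem.List.pySetD st.1 i 1, st.2 + 1)
  else st

def solve (nums1 : List Int) (nums2 : List Int) : Int × Int :=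
  let a := PySem.List.sorted nums1 (fun x => x) false
  let b := PySem.List.sorted nums2 (fun x => x) false
  let n2 : Int := b.length
  let st := (PySem.List.pyRange 0 n2 1).foldl (stepA a b)
      ((PySem.List.pyRange 0 n2 1).map (fun _ => (0 : Int)), 0)
  let remain := n2 - st.2
  -- nums2[n2-1]: IndexError on empty nums2 (excluded by Pre_solve); default is irrelevant under Pre_
  let lastMax0 := PySem.List.pyGetD b (n2 - 1) 0
  -- backward loop with break = first i from n2-1 down with dp1[i] == 0
  let lastMax := match (PySem.List.pyRange (n2 - 1) (-1) (-1)).find?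
      (fun i => PySem.List.pyGetD st.1 i 0 == 0) with
    | some i => PySem.List.pyGetD b i 0
    | none => lastMax0
  (remain, lastMax)

-- ===== PORT B =====
-- B's inner while loop: skip nums2[i] while i < n2 and nums2[i] <= x, recording it in lastMax.
-- Python's i is an int that stays ≥ 0 throughout, so it is carried as a Nat; nums2[i] is only
-- read under i < n2, so List.getD is exact there.
def skipB (b : List Int) (x : Int) (i : Nat) (lm : Int) : Nat × Int :=
  if h : i < b.length ∧ b.getD i 0 ≤ x then skipB b x (i + 1) (b.getD i 0) else (i, lm)
termination_by b.length - i
decreasing_by omega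

-- one iteration of B's outer for-loop over nums1: state (lastMax, i, matched)
def stepAlt (b : List Int) (st : Int × Nat × Int) (x : Int) : Int × Nat × Int :=
  let s := skipB b x st.2.1 st.1
  if s.1 < b.length then (s.2, s.1 + 1, st.2.2 + 1) else (s.2, s.1, st.2.2)

def solve_alt (nums1 : List Int) (nums2 : List Int) : Int × Int :=
  let a := PySem.List.sorted nums1 (fun x => x) false
  let b := PySem.List.sorted nums2 (fun x => x) false
  let n2 : Int := b.length
  -- nums2[n2-1]: IndexError on empty nums2 (excluded by Pre_solve), like A
  let lastMax0 := PySem.List.pyGetD b (n2 - 1) 0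
  let st := a.foldl (stepAlt b) (lastMax0, 0, 0)
  let lm := if (st.2.1 : Int) < n2 then PySem.List.pyGetD b (n2 - 1) 0 else st.1
  (n2 - st.2.2, lm)

-- ===== PRECONDITION & SPEC =====
-- Pre_ excludes only empty nums2, on which both A and B raise IndexError (nums2[n2-1]).
def Pre_solve (nums1 : List Int) (nums2 : List Int) : Prop := nums2 ≠ []
instance (nums1 : List Int) (nums2 : List Int) : Decidable (Pre_solve nums1 nums2) := by unfold Pre_solve; infer_instance
def pvWitness_solve : List Int × List Int := ([3, 1], [2, 2, 5])

def Spec_solve (nums1 : List Int) (nums2 : List Int) (out : Int × Int) : Prop := out = solve_alt nums1 nums2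
instance (nums1 : List Int) (nums2 : List Int) (out : Int × Int) : Decidable (Spec_solve nums1 nums2 out) := by unfold Spec_solve; infer_instance

-- ===== CLAIM (what is proved, stated in full; the proofs are below) =====
def Claim_equal_solve : Prop := ∀ (nums1 : List Int) (nums2 : List Int), Dom_solve nums1 nums2 → Pre_solve nums1 nums2 → Spec_solve nums1 nums2 (solve nums1 nums2)

-- ===== LEMMAS AND PROOFS =====

-- ---- proof-only helpers ----

-- the fused single pass (one step: state (pos1, lastMax)); intermediate between A's dp pass and B
def stepF (a b : List Int) (st : Int × Int) (i : Int) : Int × Int :=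
  if st.1 < (a.length : Int) ∧ PySem.List.pyGetD b i 0 > PySem.List.pyGetD a st.1 0 then
    (st.1 + 1, st.2)
  else (st.1, PySem.List.pyGetD b i 0)

def fusedSolve (nums1 : List Int) (nums2 : List Int) : Int × Int :=
  let a := PySem.List.sorted nums1 (fun x => x) false
  let b := PySem.List.sorted nums2 (fun x => x) false
  let n2 : Int := b.length
  let st := (PySem.List.pyRange 0 n2 1).foldl (stepF a b)
      (0, PySem.List.pyGetD b (n2 - 1) 0)
  (n2 - st.1, st.2)

-- structural recursion equivalent of the fused pass: (matched, lastMax)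
def gF : List Int → List Int → Int → Int × Int
  | _, [], lm => (0, lm)
  | [], y :: b, _ => gF [] b y
  | x :: a, y :: b, lm =>
    if y > x then ((gF a b lm).1 + 1, (gF a b lm).2) else gF (x :: a) b y

-- structural skip: drop the b-prefix ≤ x, remembering the last dropped element
def skipR (x : Int) : List Int → Int → List Int × Int
  | [], lm => ([], lm)
  | y :: b, lm => if y ≤ x then skipR x b y else (y :: b, lm)

-- structural recursion equivalent of B's loop: (matched, lastMax, remaining b-suffix)
def gB : List Int → List Int → Int → Int × Int × List Int
  | [], b, lm => (0, lm, b)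
  | x :: a, b, lm =>
    match skipR x b lm with
    | ([], lm1) => gB a [] lm1
    | (_ :: b2, lm1) => ((gB a b2 lm1).1 + 1, (gB a b2 lm1).2.1, (gB a b2 lm1).2.2)

-- ---- A = fused (the old joint stepwise invariant) ----

lemma find?_congr_mem {α : Type} (l : List α) (p q : α → Bool)
    (h : ∀ x ∈ l, p x = q x) : l.find? p = l.find? q := by
  induction l with
  | nil => rfl
  | cons x t ih =>
    simp only [List.find?_cons]
    rw [h x (by simp)]
    cases q x with
    | true => rfl
    | false => exact ih (fun y hy => h y (by simp [hy]))

lemma getD_map_const_zero (l : List Int) (j : Nat) :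
    (l.map (fun _ => (0 : Int))).getD j 0 = 0 := by
  rcases lt_or_ge j (l.map (fun _ => (0 : Int))).length with h | h <;> simp

-- the joint loop invariant after k steps of A's pass and the fused pass
def InvAF (a b : List Int) (k : Nat) : Prop :=
  let A := (PySem.List.pyRange 0 (k : Int) 1).foldl (stepA a b)
      ((PySem.List.pyRange 0 (b.length : Int) 1).map (fun _ => (0 : Int)), 0)
  let B := (PySem.List.pyRange 0 (k : Int) 1).foldl (stepF a b)
      (0, PySem.List.pyGetD b ((b.length : Int) - 1) 0)
  A.2 = B.1 ∧ A.1.length = b.length ∧ (∀ j : Nat, k ≤ j → A.1.getD j 0 = 0) ∧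
  B.2 = (match (PySem.List.pyRange ((k : Int) - 1) (-1) (-1)).find?
      (fun i => PySem.List.pyGetD A.1 i 0 == 0) with
    | some i => PySem.List.pyGetD b i 0
    | none => PySem.List.pyGetD b ((b.length : Int) - 1) 0)

lemma invAF_holds (a b : List Int) (k : Nat) (hk : k ≤ b.length) : InvAF a b k := by
  induction k with
  | zero =>
    unfold InvAF
    rw [show ((0 : Nat) : Int) = 0 by rfl, PySem.List.pyRange_one_eq_nil (le_refl 0),
        PySem.List.pyRange_neg_one_eq_nil (by omega : (0:Int) - 1 ≤ -1)]
    refine ⟨rfl, by simp [PySem.List.length_pyRange_one], fun j _ => getD_map_const_zero _ j, rfl⟩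
  | succ k ih =>
    have hk' : k ≤ b.length := Nat.le_of_succ_le hk
    obtain ⟨hpos, hlen, hzero, hlast⟩ := ih hk'
    unfold InvAF at *
    rw [show ((k + 1 : Nat) : Int) = (k : Int) + 1 by push_cast; ring,
        PySem.List.pyRange_one_succ_right (by positivity),
        List.foldl_append, List.foldl_append]
    simp only [List.foldl_cons, List.foldl_nil]
    set A := (PySem.List.pyRange 0 (k : Int) 1).foldl (stepA a b)
        ((PySem.List.pyRange 0 (b.length : Int) 1).map (fun _ => (0 : Int)), 0) with hA
    set B := (PySem.List.pyRange 0 (k : Int) 1).foldl (stepF a b)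
        (0, PySem.List.pyGetD b ((b.length : Int) - 1) 0) with hB
    have hrange : PySem.List.pyRange ((k : Int) + 1 - 1) (-1) (-1)
        = (k : Int) :: PySem.List.pyRange ((k : Int) - 1) (-1) (-1) := by
      rw [show ((k : Int) + 1 - 1) = (k : Int) by ring]
      exact PySem.List.pyRange_neg_one_cons (by omega)
    by_cases hc : A.2 < (a.length : Int) ∧ PySem.List.pyGetD b (k : Int) 0 > PySem.List.pyGetD a A.2 0
    · -- matched at index k
      have hc' : B.1 < (a.length : Int) ∧ PySem.List.pyGetD b (k : Int) 0 > PySem.List.pyGetD a B.1 0 := by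
        rw [← hpos]; exact hc
      rw [stepA, stepF, if_pos hc, if_pos hc']
      have hkd : k < A.1.length := by omega
      refine ⟨by simp [hpos], by simp [hlen], ?_, ?_⟩
      · intro j hj
        have h := PySem.List.pyGetD_pySetD_natCast A.1 k j 1 0 hkd
        rw [← PySem.List.pyGetD_natCast, h, if_neg (by omega : j ≠ k), PySem.List.pyGetD_natCast]
        exact hzero j (by omega)
      · rw [hrange]
        simp only [List.find?_cons]
        have hgetk : PySem.List.pyGetD (PySem.List.pySetD A.1 (k : Int) 1) (k : Int) 0 = 1 := by
          rw [PySem.List.pyGetD_pySetD_natCast A.1 k k 1 0 hkd, if_pos rfl]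
        rw [hgetk]
        simp only [show ((1 : Int) == 0) = false by decide]
        rw [find?_congr_mem _ _ (fun i => PySem.List.pyGetD A.1 i 0 == 0)
          (by
            intro i hi
            rw [PySem.List.mem_pyRange_neg_one] at hi
            obtain ⟨m, rfl⟩ : ∃ m : Nat, i = (m : Int) := ⟨i.toNat, by omega⟩
            rw [PySem.List.pyGetD_pySetD_natCast A.1 k m 1 0 hkd, if_neg (by omega : m ≠ k)])]
        exact hlast
    · -- unmatched at index k
      have hc' : ¬ (B.1 < (a.length : Int) ∧ PySem.List.pyGetD b (k : Int) 0 > PySem.List.pyGetD a B.1 0) := by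
        rw [← hpos]; exact hc
      rw [stepA, stepF, if_neg hc, if_neg hc']
      refine ⟨hpos, hlen, fun j hj => hzero j (by omega), ?_⟩
      rw [hrange]
      simp only [List.find?_cons]
      have hgetk : PySem.List.pyGetD A.1 (k : Int) 0 = 0 := by
        rw [PySem.List.pyGetD_natCast]; exact hzero k (le_refl k)
      rw [hgetk]
      simp

lemma solve_eq_fused (nums1 nums2 : List Int) : solve nums1 nums2 = fusedSolve nums1 nums2 := by
  unfold solve fusedSolve
  have := invAF_holds (PySem.List.sorted nums1 (fun x => x) false)
      (PySem.List.sorted nums2 (fun x => x) false)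
      (PySem.List.sorted nums2 (fun x => x) false).length (le_refl _)
  unfold InvAF at this
  obtain ⟨hpos, _, _, hlast⟩ := this
  simp only []
  rw [hpos, hlast]

-- ---- fused = gF ----

lemma foldF_eq_gF_aux (a b : List Int) : ∀ (n i pos : Nat) (lm : Int),
    b.length - i = n → i ≤ b.length → pos ≤ a.length →
    (PySem.List.pyRange (i : Int) (b.length : Int) 1).foldl (stepF a b) ((pos : Int), lm)
    = ((pos : Int) + (gF (a.drop pos) (b.drop i) lm).1, (gF (a.drop pos) (b.drop i) lm).2) := by
  intro n
  induction n with
  | zero =>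
    intro i pos lm hn hi hpos
    have hie : i = b.length := by omega
    subst hie
    rw [PySem.List.pyRange_one_eq_nil (le_refl _), List.foldl_nil, List.drop_length, gF]
    simp
  | succ n ih =>
    intro i pos lm hn hi hpos
    have hilt : i < b.length := by omega
    rw [PySem.List.pyRange_one_cons (by exact_mod_cast hilt), List.foldl_cons]
    have hbd : b.drop i = b[i] :: b.drop (i + 1) := List.drop_eq_getElem_cons hilt
    have hgb : PySem.List.pyGetD b (i : Int) 0 = b[i] := by
      rw [PySem.List.pyGetD_natCast, List.getD_eq_getElem _ _ hilt]
    have hcast : ((i : Int) + 1) = ((i + 1 : Nat) : Int) := by push_cast; ring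
    by_cases hp : pos < a.length
    · have had : a.drop pos = a[pos] :: a.drop (pos + 1) := List.drop_eq_getElem_cons hp
      have hga : PySem.List.pyGetD a ((pos : Nat) : Int) 0 = a[pos] := by
        rw [PySem.List.pyGetD_natCast, List.getD_eq_getElem _ _ hp]
      by_cases hgt : b[i] > a[pos]
      · have hc : ((pos : Int), lm).1 < (a.length : Int) ∧
            PySem.List.pyGetD b (i : Int) 0 > PySem.List.pyGetD a ((pos : Int), lm).1 0 := by
          refine ⟨?_, ?_⟩
          · simp only []; exact_mod_cast hp
          · rw [hgb]; simp only []; rw [hga]; exact hgt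
        rw [stepF, if_pos hc]
        simp only []
        rw [show ((pos : Int) + 1) = ((pos + 1 : Nat) : Int) by push_cast; ring, hcast,
            ih (i + 1) (pos + 1) lm (by omega) (by omega) (by omega)]
        rw [hbd, had, gF, if_pos hgt]
        simp only [Prod.mk.injEq]
        exact ⟨by push_cast; ring, trivial⟩
      · have hc : ¬ (((pos : Int), lm).1 < (a.length : Int) ∧
            PySem.List.pyGetD b (i : Int) 0 > PySem.List.pyGetD a ((pos : Int), lm).1 0) := by
          simp only []
          rw [hgb, hga]
          push_neg
          intro _
          omega
        rw [stepF, if_neg hc]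
        simp only [hgb]
        rw [hcast, ih (i + 1) pos b[i] (by omega) (by omega) hpos]
        rw [hbd, had, gF, if_neg hgt, ← had]
    · have hpe : pos = a.length := by omega
      have hc : ¬ (((pos : Int), lm).1 < (a.length : Int) ∧
          PySem.List.pyGetD b (i : Int) 0 > PySem.List.pyGetD a ((pos : Int), lm).1 0) := by
        simp only []
        push_neg
        intro hlt
        exfalso
        have : pos < a.length := by exact_mod_cast hlt
        omega
      rw [stepF, if_neg hc]
      simp only [hgb]
      rw [hcast, ih (i + 1) pos b[i] (by omega) (by omega) hpos]
      rw [hbd, hpe, List.drop_length, gF]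

lemma foldF_eq_gF (a b : List Int) (i pos : Nat) (lm : Int) (hi : i ≤ b.length)
    (hpos : pos ≤ a.length) :
    (PySem.List.pyRange (i : Int) (b.length : Int) 1).foldl (stepF a b) ((pos : Int), lm)
    = ((pos : Int) + (gF (a.drop pos) (b.drop i) lm).1, (gF (a.drop pos) (b.drop i) lm).2) :=
  foldF_eq_gF_aux a b (b.length - i) i pos lm rfl hi hpos

-- ---- B's port = gB ----

lemma skipR_isSuffix (x : Int) : ∀ (s : List Int) (lm : Int), (skipR x s lm).1 <:+ s := by
  intro s
  induction s with
  | nil => intro lm; simp [skipR]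
  | cons y b ih =>
    intro lm
    rw [skipR]
    split_ifs with h
    · exact (ih y).trans (List.suffix_cons y b)
    · exact List.suffix_rfl

lemma suffix_drop {α : Type} {t b : List α} (h : t <:+ b) : b.drop (b.length - t.length) = t := by
  obtain ⟨s, rfl⟩ := h
  have hl : (s ++ t).length - t.length = s.length := by simp
  rw [hl, List.drop_left]

lemma skipB_eq_skipR_aux (b : List Int) (x : Int) : ∀ (n i : Nat) (lm : Int),
    b.length - i = n → i ≤ b.length →
    skipB b x i lm = (b.length - (skipR x (b.drop i) lm).1.length, (skipR x (b.drop i) lm).2) := by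
  intro n
  induction n with
  | zero =>
    intro i lm hn hi
    have hie : i = b.length := by omega
    subst hie
    rw [skipB, dif_neg (by omega), List.drop_length, skipR]
    simp
  | succ n ih =>
    intro i lm hn hi
    have hilt : i < b.length := by omega
    rw [List.drop_eq_getElem_cons hilt, skipR, skipB]
    by_cases h : b[i] ≤ x
    · rw [if_pos h, dif_pos ⟨hilt, by rw [List.getD_eq_getElem _ _ hilt]; exact h⟩]
      rw [List.getD_eq_getElem _ _ hilt]
      exact ih (i + 1) b[i] (by omega) (by omega)
    · rw [if_neg h, dif_neg (by rw [List.getD_eq_getElem _ _ hilt]; omega)]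
      have hl : (b[i] :: b.drop (i + 1)).length = b.length - i := by
        simp only [List.length_cons, List.length_drop]; omega
      rw [hl]
      congr 1
      omega

lemma skipB_eq_skipR (b : List Int) (x : Int) (i : Nat) (lm : Int) (hi : i ≤ b.length) :
    skipB b x i lm = (b.length - (skipR x (b.drop i) lm).1.length, (skipR x (b.drop i) lm).2) :=
  skipB_eq_skipR_aux b x (b.length - i) i lm rfl hi

lemma gB_nil : ∀ (a : List Int) (lm : Int), gB a [] lm = (0, lm, []) := by
  intro a
  induction a with
  | nil => intro lm; rfl
  | cons x a ih => intro lm; rw [gB, skipR]; exact ih lm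

lemma gB_rest_suffix : ∀ (a b : List Int) (lm : Int), (gB a b lm).2.2 <:+ b := by
  intro a
  induction a with
  | nil => intro b lm; exact List.suffix_rfl
  | cons x a ih =>
    intro b lm
    rw [gB]
    rcases hs : skipR x b lm with ⟨rest, lm1⟩
    have hsuf : rest <:+ b := by rw [← show (skipR x b lm).1 = rest by rw [hs]]; exact skipR_isSuffix x b lm
    cases rest with
    | nil => simp only []; rw [gB_nil]; exact List.nil_suffix
    | cons y b2 =>
      simp only []
      exact ((ih b2 lm1).trans (List.suffix_cons y b2)).trans hsuf

lemma foldAlt_eq_gB (b : List Int) : ∀ (a : List Int) (i : Nat) (lm c : Int), i ≤ b.length →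
    a.foldl (stepAlt b) (lm, i, c)
    = ((gB a (b.drop i) lm).2.1, b.length - (gB a (b.drop i) lm).2.2.length,
       c + (gB a (b.drop i) lm).1) := by
  intro a
  induction a with
  | nil =>
    intro i lm c hi
    simp only [List.foldl_nil, gB, Prod.mk.injEq]
    refine ⟨trivial, ?_, by ring⟩
    simp only [List.length_drop]
    omega
  | cons x a ih =>
    intro i lm c hi
    rw [List.foldl_cons]
    rcases hs : skipR x (b.drop i) lm with ⟨rest, lm1⟩
    have hsuf : rest <:+ b := by
      have h1 : rest <:+ b.drop i := by
        rw [← show (skipR x (b.drop i) lm).1 = rest by rw [hs]]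
        exact skipR_isSuffix x (b.drop i) lm
      exact h1.trans (List.drop_suffix i b)
    have hrl : rest.length ≤ b.length := hsuf.length_le
    have hstep : stepAlt b (lm, i, c) x
        = (if b.length - rest.length < b.length
            then (lm1, b.length - rest.length + 1, c + 1)
            else (lm1, b.length - rest.length, c)) := by
      unfold stepAlt
      rw [skipB_eq_skipR b x i lm hi, hs]
    cases rest with
    | nil =>
      have hgb : gB (x :: a) (b.drop i) lm = gB a [] lm1 := by rw [gB, hs]
      rw [hstep, if_neg (by simp), hgb, gB_nil]
      simp only [List.length_nil, Nat.sub_zero]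
      rw [ih b.length lm1 c (le_refl _), List.drop_length, gB_nil]
      simp
    | cons y b2 =>
      have hgb : gB (x :: a) (b.drop i) lm
          = ((gB a b2 lm1).1 + 1, (gB a b2 lm1).2.1, (gB a b2 lm1).2.2) := by rw [gB, hs]
      have hlt : b.length - (y :: b2).length < b.length := by
        simp only [List.length_cons] at hrl ⊢; omega
      rw [hstep, if_pos hlt, hgb]
      have hdrop : b.drop (b.length - (y :: b2).length) = y :: b2 := suffix_drop hsuf
      have hdrop2 : b.drop (b.length - (y :: b2).length + 1) = b2 := by
        rw [← List.tail_drop, hdrop, List.tail_cons]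
      rw [ih _ lm1 (c + 1) (by simp only [List.length_cons] at hrl ⊢; omega), hdrop2]
      simp only [Prod.mk.injEq]
      exact ⟨trivial, trivial, by ring⟩

-- ---- gF = gB ----

lemma getLastD_irrel {α : Type} (b : List α) (d e : α) (h : b ≠ []) : b.getLastD d = b.getLastD e := by
  cases b with
  | nil => exact absurd rfl h
  | cons y t =>
    rw [List.getLastD_eq_getLast?, List.getLastD_eq_getLast?]
    induction t generalizing y with
    | nil => rfl
    | cons z t ih => simp [List.getLast?_cons_cons, ih]

lemma gF_nil : ∀ (b : List Int) (lm : Int), b ≠ [] → gF [] b lm = (0, b.getLastD 0) := by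
  intro b
  induction b with
  | nil => intro lm h; exact absurd rfl h
  | cons y t ih =>
    intro lm _
    rw [gF, List.getLastD_cons]
    cases ht : t with
    | nil => rfl
    | cons z t' =>
      rw [← ht, ih y (by rw [ht]; simp), getLastD_irrel t 0 y (by rw [ht]; simp)]

lemma gF_cons (x : Int) (a : List Int) : ∀ (b : List Int) (lm : Int),
    gF (x :: a) b lm = (match skipR x b lm with
      | ([], lm1) => (0, lm1)
      | (_ :: b2, lm1) => ((gF a b2 lm1).1 + 1, (gF a b2 lm1).2)) := by
  intro b
  induction b with
  | nil => intro lm; rfl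
  | cons y b' ih =>
    intro lm
    rw [gF, skipR]
    by_cases h : y > x
    · rw [if_pos h, if_neg (by omega : ¬ y ≤ x)]
    · rw [if_neg h, if_pos (by omega : y ≤ x)]
      exact ih y

lemma gF_eq_gB : ∀ (a b : List Int) (lm : Int),
    gF a b lm = ((gB a b lm).1,
      if (gB a b lm).2.2 = [] then (gB a b lm).2.1 else (gB a b lm).2.2.getLastD 0) := by
  intro a
  induction a with
  | nil =>
    intro b lm
    cases b with
    | nil => rfl
    | cons y t => rw [gB]; simp only [if_neg (List.cons_ne_nil y t)]; exact gF_nil (y :: t) lm (by simp)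
  | cons x a ih =>
    intro b lm
    rw [gF_cons, gB]
    rcases hs : skipR x b lm with ⟨rest, lm1⟩
    cases rest with
    | nil => simp only []; rw [gB_nil]; rfl
    | cons y b2 => simp only []; rw [ih b2 lm1]

lemma pyGetD_last (b : List Int) (h : b ≠ []) :
    PySem.List.pyGetD b ((b.length : Int) - 1) 0 = b.getLastD 0 := by
  have hlen : 1 ≤ b.length := List.length_pos_iff.mpr h
  have hc : ((b.length : Int) - 1) = ((b.length - 1 : Nat) : Int) := by omega
  rw [hc, PySem.List.pyGetD_natCast]
  rw [List.getD_eq_getElem _ _ (by omega), List.getLastD_eq_getLast?, List.getLast?_eq_getElem?]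
  rw [List.getElem?_eq_getElem (by omega)]
  rfl

lemma getLastD_suffix {t b : List Int} (h : t <:+ b) (hne : t ≠ []) :
    t.getLastD 0 = b.getLastD 0 := by
  obtain ⟨s, rfl⟩ := h
  rw [List.getLastD_eq_getLast?, List.getLastD_eq_getLast?, List.getLast?_append_of_ne_nil s hne]

-- ===== VERDICT (by name: the statement is the Claim_ definition above) =====
theorem solve_spec : Claim_equal_solve := by
  intro nums1 nums2 _ hpre
  unfold Spec_solve
  rw [solve_eq_fused]
  unfold fusedSolve solve_alt
  simp only []
  set a := PySem.List.sorted nums1 (fun x => x) false with ha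
  set b := PySem.List.sorted nums2 (fun x => x) false with hb
  have hbne : b ≠ [] := by
    rw [hb]
    intro h
    exact hpre ((PySem.List.sorted_eq_nil_iff nums2 (fun x => x) false).mp h)
  set lm0 := PySem.List.pyGetD b ((b.length : Int) - 1) 0 with hlm0
  have hF := foldF_eq_gF a b 0 0 lm0 (Nat.zero_le _) (Nat.zero_le _)
  have hB := foldAlt_eq_gB b a 0 lm0 0 (Nat.zero_le _)
  simp only [Nat.cast_zero, List.drop_zero] at hF hB
  rw [hF, hB, gF_eq_gB a b lm0]
  have hsuf := gB_rest_suffix a b lm0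
  have hlen := hsuf.length_le
  by_cases hrest : (gB a b lm0).2.2 = []
  · simp only [hrest, List.length_nil, Nat.sub_zero]
    rw [if_pos trivial, if_neg (by omega)]
  · have hrl : 1 ≤ (gB a b lm0).2.2.length := by
      cases hgr : (gB a b lm0).2.2 with
      | nil => exact absurd hgr hrest
      | cons z t => simp
    rw [if_neg hrest]
    rw [if_pos (by
      have : b.length - (gB a b lm0).2.2.length < b.length := by omega
      exact_mod_cast this)]
    simp only [Prod.mk.injEq]
    constructor
    · trivial
    · rw [getLastD_suffix hsuf hrest, hlm0, pyGetD_last b hbne]
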